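-- pv_equiv track=rewrite | github.com/javokhirbek1999/AlgorithmsDS | FAANG-Interview-Questions/Google/Decreasing-Subsequences.py | solve
-- ===== SOURCE A (Python) =====
-- from typing import List
--
-- def solve(subsequences: List[int]) -> int:
--
--     subseqs = []
--
--     for number in subsequences:
--         if not subseqs:
--             subseqs.append([number])
--         else:
--             inserted = False
--             for subseq in subseqs:
--                 if subseq[-1] > number:
--                     subseq.append(number)
--                     inserted = True
--                     break
--
--             if not inserted:
--                 subseqs.append([number])
--
--     return len(subseqs)
-- ===== SOURCE B (Python) =====
-- from typing import List
--
-- def solve(subsequences: List[int]) -> int: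
--     # Keep only the last element ("tail") of each greedy pile; tails stay sorted
--     # non-decreasing, so the first pile whose tail exceeds n is found by binary search.
--     tails = []
--     for n in subsequences:
--         lo, hi = 0, len(tails)
--         while lo < hi:
--             mid = (lo + hi) // 2
--             if tails[mid] <= n:
--                 lo = mid + 1
--             else:
--                 hi = mid
--         if lo < len(tails):
--             tails[lo] = n
--         else:
--             tails.append(n)
--     return len(tails)
-- ===== Notes on version B (the rewrite author's own statement) =====
-- stated objective: faster
-- what changed: Replaces the linear first-fit scan over whole piles with a sorted list of pile tails and a hand-written binary search (bisect_right) to locate the target pile.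
import Mathlib
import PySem

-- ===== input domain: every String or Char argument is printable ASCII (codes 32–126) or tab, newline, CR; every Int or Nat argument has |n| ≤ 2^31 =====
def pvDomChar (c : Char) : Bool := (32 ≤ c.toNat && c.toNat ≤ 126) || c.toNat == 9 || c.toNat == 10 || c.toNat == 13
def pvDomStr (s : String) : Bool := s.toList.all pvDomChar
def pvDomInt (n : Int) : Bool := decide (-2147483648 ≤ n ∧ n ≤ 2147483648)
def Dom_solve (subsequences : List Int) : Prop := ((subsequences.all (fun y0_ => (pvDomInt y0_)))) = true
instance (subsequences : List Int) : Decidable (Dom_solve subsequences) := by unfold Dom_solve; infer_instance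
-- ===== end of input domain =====

-- B replaces A's linear first-fit scan over whole piles by a sorted list of pile
-- tails with a hand-written binary search (bisect_right); asymptotically faster.

-- ===== PORT A =====
-- subseq[-1]; the inner lists are never empty in A, so the .getD 0 default is unreachable
def tailOf (s : List Int) : Int := (PySem.List.pyGet? s (-1)).getD 0

-- the inner 'for subseq in subseqs: if subseq[-1] > number: subseq.append(number); break'
def tryInsert : List (List Int) → Int → Option (List (List Int))
  | [], _ => none
  | s :: rest, number =>
    if tailOf s > number then some ((s ++ [number]) :: rest)
    else (tryInsert rest number).map (fun r => s :: r)

-- the body of A's outer loop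
def solveStep (subseqs : List (List Int)) (number : Int) : List (List Int) :=
  if subseqs = [] then [[number]]
  else
    match tryInsert subseqs number with
    | some s => s            -- inserted = True
    | none => subseqs ++ [[number]]

def solve (subsequences : List Int) : Int :=
  ((subsequences.foldl solveStep []).length : Int)

-- ===== PORT B =====
-- the 'while lo < hi' binary search; tails[mid] is always in range, so .getD 0 is exact
def bsr (tails : List Int) (n : Int) (lo hi : Nat) : Nat :=
  if lo < hi then
    if tails.getD ((lo + hi) / 2) 0 ≤ n then bsr tails n ((lo + hi) / 2 + 1) hi
    else bsr tails n lo ((lo + hi) / 2)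
  else lo
termination_by hi - lo
decreasing_by all_goals omega

-- the body of B's loop
def solveAltStep (tails : List Int) (n : Int) : List Int :=
  let i := bsr tails n 0 tails.length
  if i < tails.length then tails.set i n else tails ++ [n]

def solve_alt (subsequences : List Int) : Int :=
  ((subsequences.foldl solveAltStep []).length : Int)

-- ===== PRECONDITION & SPEC =====
def Spec_solve (subsequences : List Int) (out : Int) : Prop := out = solve_alt subsequences
instance (subsequences : List Int) (out : Int) : Decidable (Spec_solve subsequences out) := by unfold Spec_solve; infer_instance

-- ===== CLAIM (what is proved, stated in full; the proofs are below) =====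
def Claim_equal_solve : Prop := ∀ (subsequences : List Int), Dom_solve subsequences → Spec_solve subsequences (solve subsequences)

-- ===== LEMMAS AND PROOFS =====

-- the tails list is non-decreasing
def Mono (ts : List Int) : Prop := ∀ i j, i ≤ j → j < ts.length → ts.getD i 0 ≤ ts.getD j 0

theorem tailOf_append (s : List Int) (n : Int) : tailOf (s ++ [n]) = n := by
  simp [tailOf, PySem.List.pyGet?_neg_one_append_singleton]

theorem tailOf_single (n : Int) : tailOf [n] = n := by
  simpa using tailOf_append [] n

theorem getD_append_lt {ts : List Int} {n : Int} {j : Nat} (h : j < ts.length) :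
    (ts ++ [n]).getD j 0 = ts.getD j 0 := by
  simp [List.getD, List.getElem?_append_left h]

theorem getD_append_last {ts : List Int} {n : Int} :
    (ts ++ [n]).getD ts.length 0 = n := by
  simp [List.getD]

theorem getD_set_ne {ts : List Int} {n : Int} {r j : Nat} (hj : j < ts.length) (hne : ¬ j = r) :
    (ts.set r n).getD j 0 = ts.getD j 0 := by
  simp [List.getD, List.getElem?_set_ne (fun h => hne h.symm)]

theorem getD_set_self {ts : List Int} {n : Int} {r : Nat} (hr : r < ts.length) :
    (ts.set r n).getD r 0 = n := by
  simp [List.getD, List.getElem?_set_self hr]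

theorem tryInsert_cases (ss : List (List Int)) (n : Int) :
    (tryInsert ss n = none ∧ ∀ j < (ss.map tailOf).length, (ss.map tailOf).getD j 0 ≤ n) ∨
    (∃ i ss', tryInsert ss n = some ss' ∧ i < (ss.map tailOf).length ∧
      (∀ j < i, (ss.map tailOf).getD j 0 ≤ n) ∧ n < (ss.map tailOf).getD i 0 ∧
      ss'.map tailOf = (ss.map tailOf).set i n) := by
  induction ss with
  | nil => left; simp [tryInsert]
  | cons s rest ih =>
    by_cases h : tailOf s > n
    · right
      exact ⟨0, (s ++ [n]) :: rest, by simp [tryInsert, h], by simp, by omega,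
        by simpa using h, by simp [tailOf_append]⟩
    · rcases ih with ⟨hnone, hall⟩ | ⟨i, rest', heq, hilt, hpre, hgt, hmap⟩
      · left
        refine ⟨by simp [tryInsert, h, hnone], ?_⟩
        intro j hj
        cases j with
        | zero => simpa using le_of_not_gt h
        | succ k => simpa using hall k (by simpa using hj)
      · right
        refine ⟨i + 1, s :: rest', by simp [tryInsert, h, heq], by simpa using hilt, ?_,
          by simpa using hgt, by simp [hmap]⟩
        intro j hj
        cases j with
        | zero => simpa using le_of_not_gt h
        | succ k => simpa using hpre k (by omega)

theorem bsr_spec (ts : List Int) (n : Int) (hm : Mono ts) :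
    ∀ k lo hi, hi - lo ≤ k → lo ≤ hi → hi ≤ ts.length →
      (∀ j < lo, ts.getD j 0 ≤ n) → (∀ j, hi ≤ j → j < ts.length → n < ts.getD j 0) →
      lo ≤ bsr ts n lo hi ∧ bsr ts n lo hi ≤ hi ∧
      (∀ j < bsr ts n lo hi, ts.getD j 0 ≤ n) ∧
      (∀ j, bsr ts n lo hi ≤ j → j < ts.length → n < ts.getD j 0) := by
  intro k
  induction k with
  | zero =>
    intro lo hi hk hle hlen hpre hpost
    have : lo = hi := by omega
    subst this
    rw [bsr]
    simp only [lt_irrefl, if_false]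
    exact ⟨le_refl _, le_refl _, hpre, hpost⟩
  | succ k ih =>
    intro lo hi hk hle hlen hpre hpost
    rw [bsr]
    by_cases hlt : lo < hi
    · simp only [hlt, if_true]
      by_cases hmid : ts.getD ((lo + hi) / 2) 0 ≤ n
      · simp only [hmid, if_true]
        have h := ih ((lo + hi) / 2 + 1) hi (by omega) (by omega) hlen
          (fun j _ => le_trans (hm j ((lo + hi) / 2) (by omega) (by omega)) hmid) hpost
        exact ⟨by omega, h.2.1, h.2.2.1, h.2.2.2⟩
      · simp only [hmid, if_false]
        have h := ih lo ((lo + hi) / 2) (by omega) (by omega) (by omega) hpre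
          (fun j hj hjl => lt_of_lt_of_le (lt_of_not_ge hmid) (hm _ j hj hjl))
        exact ⟨h.1, by omega, h.2.2.1, h.2.2.2⟩
    · simp only [hlt, if_false]
      have : lo = hi := by omega
      exact ⟨le_refl _, by omega, hpre, fun j _ hjl => hpost j (by omega) hjl⟩

theorem step_eq (ss : List (List Int)) (n : Int) (ts : List Int)
    (hts : ss.map tailOf = ts) (hm : Mono ts) :
    (solveStep ss n).map tailOf = solveAltStep ts n ∧ Mono (solveAltStep ts n) := by
  obtain ⟨-, hrle, hrpre, hrpost⟩ := bsr_spec ts n hm ts.length 0 ts.length (by omega)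
    (by omega) (le_refl _) (by omega) (by omega)
  rcases tryInsert_cases ss n with ⟨hnone, hall⟩ | ⟨i, ss', heq, hilt, hpre, hgt, hmap⟩
  · rw [hts] at hall
    -- no pile can take n: the search returns ts.length, both sides append
    have hrlen : bsr ts n 0 ts.length = ts.length := by
      by_contra hne
      exact absurd (hall _ (by omega)) (not_le_of_gt (hrpost _ (le_refl _) (by omega)))
    have hstepB : solveAltStep ts n = ts ++ [n] := by
      simp [solveAltStep, hrlen]
    refine ⟨?_, ?_⟩
    · by_cases hse : ss = []
      · subst hse
        simp [solveStep, solveAltStep, ← hts, bsr, tailOf_single]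
      · rw [hstepB]
        simp only [solveStep, if_neg hse, hnone]
        simp [tailOf_single, hts]
    · rw [hstepB]
      intro a b hab hblen
      simp only [List.length_append, List.length_cons, List.length_nil] at hblen
      by_cases hb1 : b < ts.length
      · rw [getD_append_lt (by omega), getD_append_lt hb1]
        exact hm a b hab hb1
      · have hbeq : b = ts.length := by omega
        subst hbeq
        rw [getD_append_last]
        by_cases ha1 : a < ts.length
        · rw [getD_append_lt ha1]; exact hall a ha1
        · have : a = ts.length := by omega
          subst this
          rw [getD_append_last]
  · rw [hts] at hilt hpre hgt hmap
    -- the first pile whose tail exceeds n is pile i; the binary search finds the same i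
    have hir : i = bsr ts n 0 ts.length := by
      rcases lt_trichotomy i (bsr ts n 0 ts.length) with h | h | h
      · exact absurd (hrpre i h) (not_le_of_gt hgt)
      · exact h
      · exact absurd (hpre _ h) (not_le_of_gt (hrpost _ (le_refl _) (by omega)))
    have hrlt : bsr ts n 0 ts.length < ts.length := hir ▸ hilt
    have hstepB : solveAltStep ts n = ts.set (bsr ts n 0 ts.length) n := by
      simp [solveAltStep, hrlt]
    rw [← hir] at hstepB hrlt hrpre hrpost
    refine ⟨?_, ?_⟩
    · have hse : ss ≠ [] := by
        intro h; subst h; rw [← hts] at hilt; simp at hilt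
      rw [hstepB]
      simp only [solveStep, if_neg hse, heq]
      exact hmap
    · rw [hstepB]
      intro a b hab hblen
      rw [List.length_set] at hblen
      by_cases hbi : b = i
      · subst hbi
        by_cases hai : a = b
        · subst hai; rw [getD_set_self hrlt]
        · rw [getD_set_ne (by omega) hai, getD_set_self hrlt]
          exact hpre a (by omega)
      · rw [getD_set_ne hblen hbi]
        by_cases hai : a = i
        · subst hai
          rw [getD_set_self hrlt]
          exact le_of_lt (hrpost b hab hblen)
        · rw [getD_set_ne (by omega) hai]
          exact hm a b hab hblen

theorem fold_eq (xs : List Int) : ∀ ss : List (List Int), Mono (ss.map tailOf) →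
    (xs.foldl solveStep ss).map tailOf = xs.foldl solveAltStep (ss.map tailOf) ∧
    Mono ((xs.foldl solveStep ss).map tailOf) := by
  induction xs with
  | nil => exact fun ss hm => ⟨rfl, hm⟩
  | cons x xs ih =>
    intro ss hm
    obtain ⟨h1, h2⟩ := step_eq ss x (ss.map tailOf) rfl hm
    simp only [List.foldl_cons]
    obtain ⟨h3, h4⟩ := ih (solveStep ss x) (h1 ▸ h2)
    exact ⟨h3.trans (by rw [h1]), h4⟩

-- ===== VERDICT (by name: the statement is the Claim_ definition above) =====
theorem solve_spec : Claim_equal_solve := by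
  intro xs _
  have h := (fold_eq xs [] (by intro i j _ h; simp at h)).1
  unfold Spec_solve solve solve_alt
  have : (xs.foldl solveStep []).length = (xs.foldl solveAltStep []).length := by
    rw [← List.length_map (f := tailOf), h]; rfl
  simp [this]
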